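-- pv_equiv track=rewrite | github.com/Nghia03092004/nghia03092004.github.io | project_euler_unified/problem_106/solution.py | solve
-- ===== SOURCE A (Python) =====
-- from math import comb
--
-- def catalan(k):
--     """k-th Catalan number: C(2k,k) / (k+1)"""
--     return comb(2 * k, k) // (k + 1)
--
-- def solve(n=12):
--     total = 0
--     for k in range(2, n // 2 + 1):
--         choose_2k = comb(n, 2 * k)
--         half_choose = comb(2 * k, k) // 2
--         cat_k = catalan(k)
--         contribution = choose_2k * (half_choose - cat_k)
--         total += contribution
--     return total
-- ===== SOURCE B (Python) =====
-- def solve(n=12):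
--     # Incremental recurrences replace per-iteration comb() calls:
--     # c = comb(n, 2k), central = comb(2k, k), cat = catalan(k), advanced step by step.
--     total = 0
--     c = 1
--     central = 1
--     cat = 1
--     k = 0
--     while 2 * (k + 1) <= n:
--         c = c * (n - 2 * k) // (2 * k + 1)
--         c = c * (n - 2 * k - 1) // (2 * k + 2)
--         central = central * (2 * (2 * k + 1)) // (k + 1)
--         cat = cat * (2 * (2 * k + 1)) // (k + 2)
--         k += 1
--         if k >= 2:
--             total += c * (central // 2 - cat)
--     return total
-- ===== Notes on version B (the rewrite author's own statement) =====
-- stated objective: faster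
-- what changed: B replaces the three per-iteration closed-form comb()/catalan() computations by running products (comb(n,2k), comb(2k,k), catalan(k)) maintained across one loop via exact integer-division recurrences, turning O(n) combs recomputed from scratch into O(1) updates per iteration.
import Mathlib
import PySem

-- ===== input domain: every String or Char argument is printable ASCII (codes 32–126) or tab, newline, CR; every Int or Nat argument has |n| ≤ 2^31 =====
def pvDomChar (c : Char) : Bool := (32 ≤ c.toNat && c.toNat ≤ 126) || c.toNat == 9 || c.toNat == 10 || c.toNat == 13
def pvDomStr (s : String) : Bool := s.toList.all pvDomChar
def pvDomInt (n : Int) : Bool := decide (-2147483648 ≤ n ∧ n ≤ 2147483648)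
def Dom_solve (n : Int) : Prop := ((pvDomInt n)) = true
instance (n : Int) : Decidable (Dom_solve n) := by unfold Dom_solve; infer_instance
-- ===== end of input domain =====

-- B replaces the per-iteration comb()/catalan() calls by running products updated with
-- exact-division recurrences across one loop (objective: faster, measured).

-- ===== PORT A =====
-- math.comb a b is ported as a.toNat.choose b.toNat: exact here because every k
-- in range(2, n//2+1) has k ≥ 2 and 2k ≤ n, so all comb arguments are nonnegative.
def catalanA (k : Int) : Int :=
  PySem.Int.floordiv ((2 * k).toNat.choose k.toNat : Int) (k + 1)

def solve (n : Int) : Int :=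
  (PySem.List.pyRange 2 (PySem.Int.floordiv n 2 + 1) 1).foldl
    (fun total k =>
      let choose_2k : Int := (n.toNat.choose (2 * k).toNat : Int)
      let half_choose : Int := PySem.Int.floordiv ((2 * k).toNat.choose k.toNat : Int) 2
      let cat_k : Int := catalanA k
      let contribution := choose_2k * (half_choose - cat_k)
      total + contribution) 0

-- ===== PORT B =====
-- while-loop of Source B: state (k, c, central, cat, total); terminates since k increases
-- toward n while 2*(k+1) ≤ n.
def solveAltLoop (n : Int) (k : Nat) (c central cat total : Int) : Int :=
  if _h : 2 * ((k : Int) + 1) ≤ n then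
    let c1 := PySem.Int.floordiv (c * (n - 2 * (k : Int))) (2 * (k : Int) + 1)
    let c2 := PySem.Int.floordiv (c1 * (n - 2 * (k : Int) - 1)) (2 * (k : Int) + 2)
    let central' := PySem.Int.floordiv (central * (2 * (2 * (k : Int) + 1))) ((k : Int) + 1)
    let cat' := PySem.Int.floordiv (cat * (2 * (2 * (k : Int) + 1))) ((k : Int) + 2)
    solveAltLoop n (k + 1) c2 central' cat'
      (if 2 ≤ k + 1 then total + c2 * (PySem.Int.floordiv central' 2 - cat') else total)
  else total
termination_by n.toNat - k
decreasing_by omega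

def solve_alt (n : Int) : Int :=
  solveAltLoop n 0 1 1 1 0

-- ===== PRECONDITION & SPEC =====
def Spec_solve (n : Int) (out : Int) : Prop := out = solve_alt n
instance (n : Int) (out : Int) : Decidable (Spec_solve n out) := by unfold Spec_solve; infer_instance

-- ===== CLAIM (what is proved, stated in full; the proofs are below) =====
def Claim_equal_solve : Prop := ∀ (n : Int), Dom_solve n → Spec_solve n (solve n)

-- ===== LEMMAS AND PROOFS =====

-- the common value of one loop term, in Nat vocabulary
def termN (N J : Nat) : Int :=
  (N.choose (2 * J) : Int) * ((Nat.centralBinom J / 2 : Nat) - (catalan J : Nat))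

-- partial sums of termN over j = 2 .. m
def sumTo (N : Nat) : Nat → Int
  | 0 => 0
  | m + 1 => sumTo N m + (if 2 ≤ m + 1 then termN N (m + 1) else 0)

lemma fd_cast (a b : Nat) : PySem.Int.floordiv (a : Int) (b : Int) = ((a / b : Nat) : Int) :=
  PySem.Int.floordiv_natCast a b

lemma fd_exact (a b q : Nat) (hb : 0 < b) (h : a = q * b) :
    PySem.Int.floordiv (a : Int) (b : Int) = (q : Int) := by
  rw [fd_cast, h, Nat.mul_div_cancel q hb]

lemma catalan_mul_succ_succ (k : Nat) :
    catalan (k + 1) * (k + 2) = Nat.centralBinom (k + 1) := by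
  rw [catalan_eq_centralBinom_div]
  exact Nat.div_mul_cancel (Nat.succ_dvd_centralBinom (k + 1))

lemma catalan_step (k : Nat) :
    catalan k * (2 * (2 * k + 1)) = catalan (k + 1) * (k + 2) := by
  have h1 := catalan_mul_succ_succ k
  have h2 := Nat.succ_mul_centralBinom_succ k
  have h3 : catalan k * (k + 1) = Nat.centralBinom k := by
    rw [catalan_eq_centralBinom_div]
    exact Nat.div_mul_cancel (Nat.succ_dvd_centralBinom k)
  have : catalan k * (2 * (2 * k + 1)) * (k + 1)
       = catalan (k + 1) * (k + 2) * (k + 1) := by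
    calc catalan k * (2 * (2 * k + 1)) * (k + 1)
        = 2 * (2 * k + 1) * (catalan k * (k + 1)) := by ring
      _ = 2 * (2 * k + 1) * Nat.centralBinom k := by rw [h3]
      _ = (k + 1) * Nat.centralBinom (k + 1) := h2.symm
      _ = catalan (k + 1) * (k + 2) * (k + 1) := by rw [← h1]; ring
  exact Nat.eq_of_mul_eq_mul_right (by omega) this

lemma centralBinom_step (k : Nat) :
    Nat.centralBinom k * (2 * (2 * k + 1)) = Nat.centralBinom (k + 1) * (k + 1) :=
  calc Nat.centralBinom k * (2 * (2 * k + 1)) = 2 * (2 * k + 1) * Nat.centralBinom k := by ring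
    _ = (k + 1) * Nat.centralBinom (k + 1) := (Nat.succ_mul_centralBinom_succ k).symm
    _ = Nat.centralBinom (k + 1) * (k + 1) := by ring

lemma choose_step (N j : Nat) (_hj : j < N) :
    N.choose j * (N - j) = N.choose (j + 1) * (j + 1) :=
  (Nat.choose_succ_right_eq N j).symm

-- A's loop term equals termN, for a nonnegative index ≥ 2
lemma termA_eq (N J : Nat) :
    (N.choose (2 * (J : Int)).toNat : Int) *
      (PySem.Int.floordiv ((2 * (J : Int)).toNat.choose (J : Int).toNat : Int) 2 - catalanA J)
    = termN N J := by
  have h2 : (2 * (J : Int)).toNat = 2 * J := by omega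
  have hJ : (J : Int).toNat = J := by omega
  unfold catalanA termN
  rw [h2, hJ]
  have e1 : PySem.Int.floordiv ((2 * J).choose J : Int) 2
      = (((2 * J).choose J / 2 : Nat) : Int) := by
    exact_mod_cast fd_cast ((2 * J).choose J) 2
  have e2 : PySem.Int.floordiv ((2 * J).choose J : Int) ((J : Int) + 1)
      = (((2 * J).choose J / (J + 1) : Nat) : Int) := by
    have := fd_cast ((2 * J).choose J) (J + 1)
    push_cast at this
    exact this
  rw [e1, e2, catalan_eq_centralBinom_div, Nat.centralBinom]

-- A's fold over range(2, M+1) computes sumTo M (for any bound)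
lemma foldA_eq (N : Nat) (M : Nat) (t : Int) :
    (PySem.List.pyRange 2 ((M : Int) + 1) 1).foldl
      (fun total k =>
        total + (N.choose (2 * k).toNat : Int) *
          (PySem.Int.floordiv ((2 * k).toNat.choose k.toNat : Int) 2 - catalanA k)) t
    = t + sumTo N M := by
  induction M generalizing t with
  | zero =>
    rw [PySem.List.pyRange_one_eq_nil (by norm_num)]
    simp [sumTo]
  | succ m ih =>
    rw [show ((m + 1 : Nat) : Int) = (m : Int) + 1 by push_cast; ring]
    by_cases hm : 2 ≤ m + 1
    · have hsplit : PySem.List.pyRange 2 ((m : Int) + 1 + 1) 1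
          = PySem.List.pyRange 2 ((m : Int) + 1) 1 ++ [(m : Int) + 1] := by
        have := PySem.List.pyRange_one_succ_right (a := 2) (b := (m : Int) + 1) (by exact_mod_cast by omega)
        exact this
      have hc : ((m : Int) + 1) = ((m + 1 : Nat) : Int) := by push_cast; ring
      rw [show ((m : Int) + 1 + 1) = ((m : Int) + 1) + 1 by ring, hsplit, List.foldl_append, ih]
      simp only [List.foldl_cons, List.foldl_nil]
      rw [hc, termA_eq N (m + 1)]
      simp [sumTo, hm, add_assoc]
    · have hm0 : m = 0 := by omega
      subst hm0
      rw [show ((0 : Nat) : Int) + 1 + 1 = (2 : Int) by norm_num,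
          PySem.List.pyRange_one_eq_nil (by norm_num)]
      simp [sumTo]

-- B's loop invariant: with the running products holding their intended values,
-- the loop adds exactly the remaining partial sum.
lemma loop_inv (N : Nat) (k : Nat) (total : Int) (hk : k ≤ N / 2) :
    solveAltLoop (N : Int) k (N.choose (2 * k) : Int) (Nat.centralBinom k : Int)
        (catalan k : Int) total
    = total + (sumTo N (N / 2) - sumTo N k) := by
  by_cases hlt : k < N / 2
  · have hcond : 2 * ((k : Int) + 1) ≤ (N : Int) := by
      have : 2 * (k + 1) ≤ N := by omega
      exact_mod_cast this
    rw [solveAltLoop, dif_pos hcond]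
    dsimp only
    have h2k1 : 2 * k + 1 < N := by omega
    have h2k2 : 2 * k + 1 + 1 ≤ N := by omega
    -- c1
    have ec1 : PySem.Int.floordiv ((N.choose (2 * k) : Int) * ((N : Int) - 2 * (k : Int)))
        (2 * (k : Int) + 1) = (N.choose (2 * k + 1) : Int) := by
      have hsub : (N : Int) - 2 * (k : Int) = ((N - 2 * k : Nat) : Int) := by omega
      rw [hsub]
      have : ((N.choose (2 * k) : Int)) * ((N - 2 * k : Nat) : Int)
          = ((N.choose (2 * k) * (N - 2 * k) : Nat) : Int) := by push_cast; ring
      rw [this, show (2 * (k : Int) + 1) = ((2 * k + 1 : Nat) : Int) by push_cast; ring]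
      exact fd_exact _ _ _ (by omega) (choose_step N (2 * k) (by omega))
    rw [ec1]
    -- c2
    have ec2 : PySem.Int.floordiv ((N.choose (2 * k + 1) : Int) * ((N : Int) - 2 * (k : Int) - 1))
        (2 * (k : Int) + 2) = (N.choose (2 * (k + 1)) : Int) := by
      have hsub : (N : Int) - 2 * (k : Int) - 1 = ((N - (2 * k + 1) : Nat) : Int) := by omega
      rw [hsub]
      have : ((N.choose (2 * k + 1) : Int)) * ((N - (2 * k + 1) : Nat) : Int)
          = ((N.choose (2 * k + 1) * (N - (2 * k + 1)) : Nat) : Int) := by push_cast; ring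
      rw [this, show (2 * (k : Int) + 2) = ((2 * k + 2 : Nat) : Int) by push_cast; ring]
      have h := choose_step N (2 * k + 1) (by omega)
      exact fd_exact _ _ _ (by omega) (by omega)
    rw [ec2]
    -- central
    have ecb : PySem.Int.floordiv ((Nat.centralBinom k : Int) * (2 * (2 * (k : Int) + 1)))
        ((k : Int) + 1) = (Nat.centralBinom (k + 1) : Int) := by
      have : ((Nat.centralBinom k : Int)) * (2 * (2 * (k : Int) + 1))
          = ((Nat.centralBinom k * (2 * (2 * k + 1)) : Nat) : Int) := by push_cast; ring
      rw [this, show ((k : Int) + 1) = ((k + 1 : Nat) : Int) by push_cast; ring]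
      exact fd_exact _ _ _ (by omega) (centralBinom_step k)
    rw [ecb]
    -- cat
    have ecat : PySem.Int.floordiv ((catalan k : Int) * (2 * (2 * (k : Int) + 1)))
        ((k : Int) + 2) = (catalan (k + 1) : Int) := by
      have : ((catalan k : Int)) * (2 * (2 * (k : Int) + 1))
          = ((catalan k * (2 * (2 * k + 1)) : Nat) : Int) := by push_cast; ring
      rw [this, show ((k : Int) + 2) = ((k + 2 : Nat) : Int) by push_cast; ring]
      exact fd_exact _ _ _ (by omega) (catalan_step k)
    rw [ecat]
    have ih := loop_inv N (k + 1)
      (if 2 ≤ k + 1 then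
        total + (N.choose (2 * (k + 1)) : Int) *
          (PySem.Int.floordiv (Nat.centralBinom (k + 1) : Int) 2 - (catalan (k + 1) : Int))
       else total) (by omega)
    rw [ih]
    have ehalf : PySem.Int.floordiv (Nat.centralBinom (k + 1) : Int) 2
        = ((Nat.centralBinom (k + 1) / 2 : Nat) : Int) := by
      exact_mod_cast fd_cast (Nat.centralBinom (k + 1)) 2
    have hterm : (N.choose (2 * (k + 1)) : Int) *
        (PySem.Int.floordiv (Nat.centralBinom (k + 1) : Int) 2 - (catalan (k + 1) : Int))
        = termN N (k + 1) := by
      rw [ehalf]; rfl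
    have hsum : sumTo N (k + 1) = sumTo N k + (if 2 ≤ k + 1 then termN N (k + 1) else 0) := rfl
    rw [hsum]
    by_cases h2 : 2 ≤ k + 1
    · rw [if_pos h2, if_pos h2, hterm]; ring
    · rw [if_neg h2, if_neg h2]; ring
  · have hk' : k = N / 2 := by omega
    rw [solveAltLoop, dif_neg (by
      intro hcond
      have : 2 * (k + 1) ≤ N := by exact_mod_cast hcond
      omega)]
    rw [hk']; ring
termination_by N / 2 - k
decreasing_by omega

-- ===== VERDICT (by name: the statement is the Claim_ definition above) =====
theorem solve_spec : Claim_equal_solve := by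
  unfold Claim_equal_solve
  intro n _
  unfold Spec_solve
  by_cases hn : 0 ≤ n
  · obtain ⟨N, rfl⟩ : ∃ N : Nat, n = (N : Int) := ⟨n.toNat, (Int.toNat_of_nonneg hn).symm⟩
    unfold solve solve_alt
    dsimp only
    simp only [Int.toNat_natCast]
    have hfd : PySem.Int.floordiv (N : Int) 2 = ((N / 2 : Nat) : Int) := by
      exact_mod_cast fd_cast N 2
    rw [hfd, foldA_eq N (N / 2) 0]
    have h0 : solveAltLoop (N : Int) 0 (N.choose (2 * 0) : Int) (Nat.centralBinom 0 : Int)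
        (catalan 0 : Int) 0 = 0 + (sumTo N (N / 2) - sumTo N 0) :=
      loop_inv N 0 0 (by omega)
    simp only [Nat.mul_zero, Nat.choose_zero_right, Nat.centralBinom_zero, catalan_zero,
      Nat.cast_one] at h0
    rw [h0]
    simp [sumTo]
  · unfold solve solve_alt
    rw [solveAltLoop, dif_neg (by omega)]
    dsimp only
    rw [PySem.List.pyRange_one_eq_nil]
    · rfl
    · have h1 : PySem.Int.floordiv n 2 ≤ -1 := by
        have := PySem.Int.floordiv_lt_iff_lt_mul (a := n) (b := 2) (q := 0) (by norm_num)
        omega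
      omega
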